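-- pv_equiv track=rewrite | github.com/TheNaila/PRGuardian | src/github_actions.py | build_review_summary
-- ===== SOURCE A (Python) =====
-- def build_review_summary(ai_suggestions):
--     """
--     Build a human-readable PR review summary.
--     """
--     ai_suggestions = ai_suggestions or []
--
--     counts = {
--         "critical": 0,
--         "high": 0,
--         "medium": 0,
--         "low": 0,
--     }
--
--     for item in ai_suggestions:
--         severity = str(item.get("severity", "")).lower()
--         if severity in counts:
--             counts[severity] += 1
--
--     if counts["critical"] > 0 or counts["high"] > 0:
--         decision = "NO-GO"
--         risk_level = "High"
--     elif counts["medium"] > 0 or counts["low"] > 0: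
--         decision = "GO WITH CAUTION"
--         risk_level = "Moderate"
--     else:
--         decision = "GO"
--         risk_level = "Low"
--
--     summary = (
--         f"## PRGuardian AI Review\n\n"
--         f"**Decision:** {decision}\n"
--         f"**Risk Level:** {risk_level}\n\n"
--         f"**Findings Summary**\n"
--         f"- Critical: {counts['critical']}\n"
--         f"- High: {counts['high']}\n"
--         f"- Medium: {counts['medium']}\n"
--         f"- Low: {counts['low']}\n"
--     )
--
--     return summary
-- ===== SOURCE B (Python) =====
-- def build_review_summary(ai_suggestions):
--     """
--     Build a human-readable PR review summary.
--     """
--     ai_suggestions = ai_suggestions or []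
--
--     critical = sum(1 for item in ai_suggestions if str(item.get("severity", "")).lower() == "critical")
--     high = sum(1 for item in ai_suggestions if str(item.get("severity", "")).lower() == "high")
--     medium = sum(1 for item in ai_suggestions if str(item.get("severity", "")).lower() == "medium")
--     low = sum(1 for item in ai_suggestions if str(item.get("severity", "")).lower() == "low")
--
--     if critical > 0 or high > 0:
--         decision, risk_level = "NO-GO", "High"
--     elif medium > 0 or low > 0:
--         decision, risk_level = "GO WITH CAUTION", "Moderate"
--     else:
--         decision, risk_level = "GO", "Low"
--
--     return (
--         f"## PRGuardian AI Review\n\n"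
--         f"**Decision:** {decision}\n"
--         f"**Risk Level:** {risk_level}\n\n"
--         f"**Findings Summary**\n"
--         f"- Critical: {critical}\n"
--         f"- High: {high}\n"
--         f"- Medium: {medium}\n"
--         f"- Low: {low}\n"
--     )
-- ===== Notes on version B (the rewrite author's own statement) =====
-- stated objective: alternative
-- what changed: Replaces the mutable count dict updated in one guarded pass by four independent filtered-count scans (one per severity), with the decision branch reading plain locals.
import Mathlib
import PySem

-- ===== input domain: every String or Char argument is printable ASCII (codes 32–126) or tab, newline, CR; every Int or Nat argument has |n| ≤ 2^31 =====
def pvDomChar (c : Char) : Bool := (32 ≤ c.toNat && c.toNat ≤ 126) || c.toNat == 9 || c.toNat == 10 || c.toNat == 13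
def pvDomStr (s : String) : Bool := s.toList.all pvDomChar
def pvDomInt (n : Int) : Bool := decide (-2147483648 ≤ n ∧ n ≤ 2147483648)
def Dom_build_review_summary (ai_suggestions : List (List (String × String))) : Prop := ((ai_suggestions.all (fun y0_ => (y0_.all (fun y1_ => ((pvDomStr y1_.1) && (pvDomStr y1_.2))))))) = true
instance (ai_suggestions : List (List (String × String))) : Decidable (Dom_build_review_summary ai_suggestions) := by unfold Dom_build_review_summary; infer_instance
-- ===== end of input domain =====

-- B replaces A's mutable count dict updated in one guarded pass by four independent
-- filtered-count scans, one per severity (objective: alternative decomposition).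

-- shared helper: str(item.get("severity", "")).lower()  (str() is a no-op on a str value)
def pvSev (item : List (String × String)) : String :=
  PySem.Str.lower ((PySem.Dict.mk item).getD "severity" "")

-- shared helper: the identical f-string of both Pythons
def pvSummary (decision risk_level : String) (c h m l : Int) : String :=
  "## PRGuardian AI Review\n\n**Decision:** " ++ decision ++ "\n**Risk Level:** " ++ risk_level
  ++ "\n\n**Findings Summary**\n- Critical: " ++ PySem.Int.toStr c
  ++ "\n- High: " ++ PySem.Int.toStr h
  ++ "\n- Medium: " ++ PySem.Int.toStr m
  ++ "\n- Low: " ++ PySem.Int.toStr l ++ "\n"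

-- ===== PORT A =====
def build_review_summary (ai_suggestions : List (List (String × String))) : String :=
  let counts0 : PySem.Dict String Int :=
    ((((PySem.Dict.empty).insert "critical" 0).insert "high" 0).insert "medium" 0).insert "low" 0
  let counts := ai_suggestions.foldl
    (fun counts item =>
      let severity := pvSev item
      if counts.contains severity then counts.modify severity 0 (· + 1) else counts)
    counts0
  let dr : String × String :=
    if counts.getD "critical" 0 > 0 ∨ counts.getD "high" 0 > 0 then ("NO-GO", "High")
    else if counts.getD "medium" 0 > 0 ∨ counts.getD "low" 0 > 0 then ("GO WITH CAUTION", "Moderate")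
    else ("GO", "Low")
  pvSummary dr.1 dr.2 (counts.getD "critical" 0) (counts.getD "high" 0)
    (counts.getD "medium" 0) (counts.getD "low" 0)

-- ===== PORT B =====
def build_review_summary_alt (ai_suggestions : List (List (String × String))) : String :=
  let critical : Int := (ai_suggestions.countP (fun item => pvSev item == "critical") : Int)
  let high : Int := (ai_suggestions.countP (fun item => pvSev item == "high") : Int)
  let medium : Int := (ai_suggestions.countP (fun item => pvSev item == "medium") : Int)
  let low : Int := (ai_suggestions.countP (fun item => pvSev item == "low") : Int)
  let dr : String × String :=
    if critical > 0 ∨ high > 0 then ("NO-GO", "High")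
    else if medium > 0 ∨ low > 0 then ("GO WITH CAUTION", "Moderate")
    else ("GO", "Low")
  pvSummary dr.1 dr.2 critical high medium low

-- ===== PRECONDITION & SPEC =====
def Spec_build_review_summary (ai_suggestions : List (List (String × String))) (out : String) : Prop := out = build_review_summary_alt ai_suggestions
instance (ai_suggestions : List (List (String × String))) (out : String) : Decidable (Spec_build_review_summary ai_suggestions out) := by unfold Spec_build_review_summary; infer_instance

-- ===== CLAIM (what is proved, stated in full; the proofs are below) =====
def Claim_equal_build_review_summary : Prop := ∀ (ai_suggestions : List (List (String × String))), Dom_build_review_summary ai_suggestions → Spec_build_review_summary ai_suggestions (build_review_summary ai_suggestions)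

-- ===== LEMMAS AND PROOFS =====

-- A's counting loop, at any key the dict already contains, adds the filtered count.
theorem pv_foldl_counts_getD (l : List (List (String × String))) (d : PySem.Dict String Int)
    (k : String) (hk : d.contains k = true) :
    (l.foldl (fun counts item =>
        let severity := pvSev item
        if counts.contains severity then counts.modify severity 0 (· + 1) else counts) d).getD k 0
      = d.getD k 0 + (l.countP (fun item => pvSev item == k) : Int) := by
  induction l generalizing d with
  | nil => simp
  | cons x l ih =>
    simp only [List.foldl_cons, List.countP_cons]
    by_cases hx : pvSev x = k
    · rw [hx, if_pos hk,
        ih _ (by rw [PySem.Dict.contains_modify]; simp [hk]),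
        PySem.Dict.getD_modify_self]
      simp
      ring
    · by_cases hc : (d.contains (pvSev x)) = true
      · rw [if_pos hc,
          ih _ (by rw [PySem.Dict.contains_modify]; simp [hk]),
          PySem.Dict.getD_modify_of_ne (hne := Ne.symm hx)]
        simp [hx]
      · rw [if_neg (by simp [hc]), ih _ hk]
        simp [hx]

-- ===== VERDICT (by name: the statement is the Claim_ definition above) =====
theorem build_review_summary_spec : Claim_equal_build_review_summary := by
  intro ai _
  unfold Spec_build_review_summary build_review_summary build_review_summary_alt
  simp only []
  rw [pv_foldl_counts_getD ai _ "critical" (by decide),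
      pv_foldl_counts_getD ai _ "high" (by decide),
      pv_foldl_counts_getD ai _ "medium" (by decide),
      pv_foldl_counts_getD ai _ "low" (by decide)]
  have h1 : ((((PySem.Dict.empty.insert "critical" (0:Int)).insert "high" 0).insert "medium" 0).insert "low" 0).getD "critical" 0 = 0 := by decide
  have h2 : ((((PySem.Dict.empty.insert "critical" (0:Int)).insert "high" 0).insert "medium" 0).insert "low" 0).getD "high" 0 = 0 := by decide
  have h3 : ((((PySem.Dict.empty.insert "critical" (0:Int)).insert "high" 0).insert "medium" 0).insert "low" 0).getD "medium" 0 = 0 := by decide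
  have h4 : ((((PySem.Dict.empty.insert "critical" (0:Int)).insert "high" 0).insert "medium" 0).insert "low" 0).getD "low" 0 = 0 := by decide
  rw [h1, h2, h3, h4]
  simp only [zero_add]
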